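-- pv_equiv track=rewrite | github.com/jahmar-code/python-CountryCatalogue | processUpdates.py | validArea
-- ===== SOURCE A (Python) =====
-- def validArea(area):
--     if type(area) == str:
--         components = area.split(",")
--         for i in components:
--             if len(i) == 1 or len(i) == 2 or len(i) == 3:
--                 return True
--             elif len(i) > 3:
--                 return False
--             else:
--                 return False
--     else:
--         return False
-- ===== SOURCE B (Python) =====
-- def validArea(area):
--     if type(area) != str:
--         return False
--     idx = area.find(",")
--     n = idx if idx != -1 else len(area)
--     return 1 <= n <= 3
-- ===== Notes on version B (the rewrite author's own statement) =====
-- stated objective: simpler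
-- what changed: B drops the split-and-loop entirely: since A always decides on the first component, B locates the first comma with str.find and does one range check on that prefix length, allocating no list.
import Mathlib
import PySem

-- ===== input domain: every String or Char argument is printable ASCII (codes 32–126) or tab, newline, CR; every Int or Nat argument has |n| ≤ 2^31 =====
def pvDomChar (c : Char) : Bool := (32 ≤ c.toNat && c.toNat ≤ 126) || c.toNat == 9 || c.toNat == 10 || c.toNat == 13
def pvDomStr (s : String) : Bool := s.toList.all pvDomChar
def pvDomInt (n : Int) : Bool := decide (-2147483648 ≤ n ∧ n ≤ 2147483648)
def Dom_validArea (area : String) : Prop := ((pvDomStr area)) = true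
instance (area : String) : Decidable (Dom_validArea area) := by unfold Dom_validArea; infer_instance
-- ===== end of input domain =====

-- B replaces A's split(",")-then-loop (which always decides on the first component) by a
-- single str.find for the first comma and one range check on that prefix length: simpler, no list.

-- ===== PORT A =====
-- the for-loop body: every branch returns, so only the first component is ever inspected
def validAreaLoop : List String → Bool
  | [] => false  -- unreachable: str.split always yields at least one component
  | i :: _ =>
    if PySem.Str.len i = 1 || PySem.Str.len i = 2 || PySem.Str.len i = 3 then true
    else if PySem.Str.len i > 3 then false
    else false

def validArea (area : String) : Bool :=
  -- type(area) == str always holds for a String argument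
  match PySem.Str.split? area "," with
  | some components => validAreaLoop components
  | none => false  -- unreachable: separator "," is nonempty

-- ===== PORT B =====
def validArea_alt (area : String) : Bool :=
  let idx := PySem.Str.find area ","
  let n := if idx ≠ -1 then idx else PySem.Str.len area
  decide (1 ≤ n ∧ n ≤ 3)

-- ===== PRECONDITION & SPEC =====
def Spec_validArea (area : String) (out : Bool) : Prop := out = validArea_alt area
instance (area : String) (out : Bool) : Decidable (Spec_validArea area out) := by unfold Spec_validArea; infer_instance

-- ===== CLAIM (what is proved, stated in full; the proofs are below) =====
def Claim_equal_validArea : Prop := ∀ (area : String), Dom_validArea area → Spec_validArea area (validArea area)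

-- ===== LEMMAS AND PROOFS =====

-- splitOn.go is insensitive to the accumulator except for prepending its reverse
lemma splitOn_go_acc (sep : List Char) :
    ∀ (fuel : Nat) (l cur : List Char) (acc : List (List Char)),
      PySem.Chars.splitOn.go sep fuel l cur acc =
        acc.reverse ++ PySem.Chars.splitOn.go sep fuel l cur [] := by
  intro fuel
  induction fuel with
  | zero => intro l cur acc; simp [PySem.Chars.splitOn.go]
  | succ f ih =>
    intro l cur acc
    cases l with
    | nil => simp [PySem.Chars.splitOn.go]
    | cons c rest =>
      simp only [PySem.Chars.splitOn.go]
      split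
      · rw [ih _ _ (cur.reverse :: acc), ih _ _ [cur.reverse]]
        simp
      · exact ih rest (c :: cur) acc

-- head of a single-character split is the prefix before the first occurrence of that character
lemma splitOn_go_head (c : Char) :
    ∀ (fuel : Nat) (l cur : List Char), l.length ≤ fuel →
      ∃ t, PySem.Chars.splitOn.go [c] fuel l cur [] =
        (cur.reverse ++ l.takeWhile (· ≠ c)) :: t := by
  intro fuel
  induction fuel with
  | zero =>
    intro l cur h
    have : l = [] := List.eq_nil_of_length_eq_zero (Nat.le_zero.mp h)
    subst this
    exact ⟨[], by simp [PySem.Chars.splitOn.go]⟩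
  | succ f ih =>
    intro l cur h
    cases l with
    | nil => exact ⟨[], by simp [PySem.Chars.splitOn.go]⟩
    | cons a rest =>
      simp only [PySem.Chars.splitOn.go]
      by_cases hac : a = c
      · subst hac
        have hpre : [a].isPrefixOf (a :: rest) = true := by simp [List.isPrefixOf]
        rw [if_pos hpre, splitOn_go_acc]
        refine ⟨PySem.Chars.splitOn.go [a] f (List.drop 1 (a :: rest)) [] [], ?_⟩
        simp [List.takeWhile]
      · have hpre : [c].isPrefixOf (a :: rest) = false := by
          simp [List.isPrefixOf]
          exact fun hac' => hac hac'.symm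
        rw [if_neg (by simp [hpre])]
        obtain ⟨t, ht⟩ := ih rest (a :: cur) (by simpa using Nat.le_of_succ_le_succ h)
        refine ⟨t, ?_⟩
        rw [ht]
        simp [List.takeWhile, hac]

-- single-character find counts the prefix before the first occurrence, -1 if absent
lemma find_go_char (c : Char) :
    ∀ (l : List Char) (k : Nat),
      PySem.Chars.find.go [c] l k =
        if c ∈ l then (k : Int) + (l.takeWhile (· ≠ c)).length else -1 := by
  intro l
  induction l with
  | nil => intro k; simp [PySem.Chars.find.go]
  | cons a rest ih =>
    intro k
    simp only [PySem.Chars.find.go]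
    by_cases hac : a = c
    · subst hac
      have hpre : [a].isPrefixOf (a :: rest) = true := by simp [List.isPrefixOf]
      rw [if_pos hpre]
      simp [List.takeWhile]
    · have hca : c ≠ a := fun h => hac h.symm
      have hpre : [c].isPrefixOf (a :: rest) = false := by
        simp [List.isPrefixOf]; exact hca
      rw [if_neg (by simp [hpre]), ih]
      by_cases hm : c ∈ rest
      · simp [hm, hca, List.takeWhile, hac]
        ring
      · simp [hm, hca]

-- the three-way length test of A's first branch equals B's range check
lemma range_check (n : Int) :
    (if (decide (n = 1) || decide (n = 2) || decide (n = 3)) = true then true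
     else if n > 3 then false else false) = decide (1 ≤ n ∧ n ≤ 3) := by
  by_cases h1 : n = 1
  · simp [h1]
  · by_cases h2 : n = 2
    · simp [h2]
    · by_cases h3 : n = 3
      · simp [h3]
      · by_cases h4 : n > 3 <;>
          first
          | (simp [h1, h2, h3, h4]; omega)
          | simp [h1, h2, h3, h4]

lemma find_char (c : Char) (l : List Char) :
    PySem.Chars.find l [c] =
      if c ∈ l then ((l.takeWhile (· ≠ c)).length : Int) else -1 := by
  have := find_go_char c l 0
  simpa [PySem.Chars.find] using this

-- ===== VERDICT (by name: the statement is the Claim_ definition above) =====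
theorem validArea_spec : Claim_equal_validArea := by
  intro area _
  unfold Spec_validArea validArea validArea_alt
  set cs := area.toList with hcs
  have hsplit : PySem.Str.split? area "," =
      some ((PySem.Chars.splitOn cs [',']).map String.ofList) := by
    simp [PySem.Str.split?, PySem.Chars.split?, hcs]
  rw [hsplit]
  obtain ⟨t, ht⟩ := splitOn_go_head ',' (cs.length + 1) cs [] (by omega)
  have hsplitOn : PySem.Chars.splitOn cs [','] = (cs.takeWhile (· ≠ ',')) :: t := by
    simpa [PySem.Chars.splitOn] using ht
  rw [hsplitOn]
  have hfind : PySem.Str.find area "," =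
      if ',' ∈ cs then ((cs.takeWhile (· ≠ ',')).length : Int) else -1 := by
    rw [PySem.Str.find_eq]
    simpa [hcs] using find_char ',' cs
  set m : Nat := (cs.takeWhile (· ≠ ',')).length with hm
  have hlen : PySem.Str.len (String.ofList (cs.takeWhile (· ≠ ','))) = (m : Int) := by
    simp [PySem.Str.len, hm]
  by_cases hmem : ',' ∈ cs
  · -- first comma exists: B's n is the find result = m
    have hne : ((m : Int)) ≠ -1 := by omega
    simp only [validAreaLoop, List.map_cons, hfind, if_pos hmem, hlen, if_pos hne]
    exact range_check (m : Int)
  · -- no comma: takeWhile is all of cs, B's n is len area = m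
    have hall : cs.takeWhile (· ≠ ',') = cs := by
      apply List.takeWhile_eq_self_iff.mpr
      intro x hx
      simp
      exact fun h => hmem (h ▸ hx)
    have hlen2 : PySem.Str.len area = (m : Int) := by
      simp only [PySem.Str.len, hm, hall]
      rw [hcs]
    simp only [validAreaLoop, List.map_cons, hfind, if_neg hmem, hlen, hlen2]
    simp only [ne_eq, not_true_eq_false, if_false]
    exact range_check (m : Int)
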